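-- pv_equiv track=rewrite | github.com/aphoticshaman/HungryOrca | gatorca_phase5_dna_library.py | tile_2x2
-- ===== SOURCE A (Python) =====
-- from typing import List, Dict, Any, Tuple, Set
--
-- Grid = List[List[int]]
--
-- def tile_2x2(g: Grid) -> Grid:
--     """Tile 2x2 (create 2x2 grid of copies)"""
--     if not g or not g[0]:
--         return g
--     h, w = len(g), len(g[0])
--     result = [[0]*(w*2) for _ in range(h*2)]
--     for ty in range(2):
--         for tx in range(2):
--             for y in range(h):
--                 for x in range(w):
--                     result[ty*h+y][tx*w+x] = g[y][x]
--     return result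
-- ===== SOURCE B (Python) =====
-- def tile_2x2(g):
--     """Tile 2x2 (create 2x2 grid of copies)"""
--     if not g or not g[0]:
--         return g
--     w = len(g[0])
--     doubled = [row[:w] * 2 for row in g]
--     return doubled + [r[:] for r in doubled]
-- ===== Notes on version B (the rewrite author's own statement) =====
-- stated objective: simpler
-- what changed: Replaces the preallocated zero grid filled by a 4-deep indexed-write loop with a two-step construction: horizontally double each row by concatenation, then vertically tile by list concatenation (fresh copies for the bottom half); bulk list operations avoid per-cell Python-level index writes.
import Mathlib
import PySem

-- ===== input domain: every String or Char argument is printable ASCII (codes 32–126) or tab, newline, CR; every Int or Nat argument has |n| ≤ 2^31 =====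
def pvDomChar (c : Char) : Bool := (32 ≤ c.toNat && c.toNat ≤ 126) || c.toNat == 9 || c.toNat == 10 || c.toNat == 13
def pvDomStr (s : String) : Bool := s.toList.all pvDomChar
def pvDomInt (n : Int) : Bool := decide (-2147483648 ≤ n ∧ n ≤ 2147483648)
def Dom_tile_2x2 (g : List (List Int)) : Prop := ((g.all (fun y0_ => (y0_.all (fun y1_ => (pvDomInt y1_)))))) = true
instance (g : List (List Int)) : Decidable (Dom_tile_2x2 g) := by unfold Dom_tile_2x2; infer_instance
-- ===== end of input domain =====

-- B replaces A's preallocated zero grid and 4-deep indexed-write loop by building each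
-- horizontally-doubled row and concatenating two copies of that list (objective: simpler).

-- ===== PORT A =====
-- 'result[i][j] = v' for the nonnegative in-range indices A uses (guaranteed on Pre_):
def pySetCell (res : List (List Int)) (i j : Int) (v : Int) : List (List Int) :=
  res.set i.toNat ((res.getD i.toNat []).set j.toNat v)

def tile_2x2 (g : List (List Int)) : List (List Int) :=
  if g = [] ∨ g.headI = [] then g
  else
    let h : Int := g.length
    let w : Int := g.headI.length
    let result : List (List Int) :=
      List.replicate (h * 2).toNat (List.replicate (w * 2).toNat (0 : Int))
    (PySem.List.pyRange 0 2 1).foldl (fun res ty =>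
      (PySem.List.pyRange 0 2 1).foldl (fun res tx =>
        (PySem.List.pyRange 0 h 1).foldl (fun res y =>
          (PySem.List.pyRange 0 w 1).foldl (fun res x =>
            pySetCell res (ty * h + y) (tx * w + x)
              (PySem.List.pyGetD (PySem.List.pyGetD g y []) x 0)) res) res) res) result

-- ===== PORT B =====
def tile_2x2_alt (g : List (List Int)) : List (List Int) :=
  if g = [] ∨ g.headI = [] then g
  else
    let w : Int := g.headI.length
    -- row[:w] * 2
    let doubled : List (List Int) :=
      g.map (fun row => PySem.List.slice row none (some w) ++ PySem.List.slice row none (some w))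
    -- doubled + [r[:] for r in doubled]
    doubled ++ doubled.map (fun r => PySem.List.slice r none none)

-- ===== PRECONDITION & SPEC =====
-- Pre_ excludes exactly the grids on which A raises IndexError: first row nonempty but some
-- row shorter than it (g[y][x] with x < len(g[0]) then fails).
def Pre_tile_2x2 (g : List (List Int)) : Prop :=
  ∀ row ∈ g, g.headI.length ≤ row.length
instance (g : List (List Int)) : Decidable (Pre_tile_2x2 g) := by unfold Pre_tile_2x2; infer_instance
def pvWitness_tile_2x2 : List (List Int) := [[1, 2], [3, 4]]

def Spec_tile_2x2 (g : List (List Int)) (out : List (List Int)) : Prop := out = tile_2x2_alt g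
instance (g : List (List Int)) (out : List (List Int)) : Decidable (Spec_tile_2x2 g out) := by unfold Spec_tile_2x2; infer_instance

-- ===== CLAIM (what is proved, stated in full; the proofs are below) =====
def Claim_equal_tile_2x2 : Prop := ∀ (g : List (List Int)), Dom_tile_2x2 g → Pre_tile_2x2 g → Spec_tile_2x2 g (tile_2x2 g)

-- ===== LEMMAS AND PROOFS =====

-- writing one row segment: row.set (c0+0) (v 0), …, row.set (c0+(n-1)) (v (n-1))
def rowW (n c0 : Nat) (v : Nat → Int) (row : List Int) : List Int :=
  (List.range n).foldl (fun row k => row.set (c0 + k) (v k)) row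

theorem rowW_length (n c0 : Nat) (v : Nat → Int) (row : List Int) :
    (rowW n c0 v row).length = row.length := by
  induction n with
  | zero => rfl
  | succ n ih =>
      simp only [rowW, List.range_succ, List.foldl_append, List.foldl_cons, List.foldl_nil] at *
      simp [List.length_set, ih]

theorem rowW_getD (n c0 j : Nat) (v : Nat → Int) (row : List Int)
    (hle : c0 + n ≤ row.length) :
    (rowW n c0 v row).getD j 0 =
      if c0 ≤ j ∧ j < c0 + n then v (j - c0) else row.getD j 0 := by
  induction n with
  | zero => simp [rowW]
  | succ n ih =>
      have hlen := rowW_length n c0 v row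
      simp only [rowW, List.range_succ, List.foldl_append, List.foldl_cons, List.foldl_nil] at *
      by_cases hj : j = c0 + n
      · subst hj
        rw [List.getD_eq_getElem?_getD, List.getElem?_set_self (by omega)]
        simp
      · rw [List.getD_eq_getElem?_getD, List.getElem?_set_ne (by omega),
            ← List.getD_eq_getElem?_getD, ih (by omega)]
        by_cases h1 : c0 ≤ j ∧ j < c0 + n
        · rw [if_pos h1, if_pos (by omega)]
        · rw [if_neg h1, if_neg (by omega)]

-- one inner x-loop: all writes hit row R
def innerF (n c0 R : Nat) (v : Nat → Int) (res : List (List Int)) : List (List Int) :=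
  (List.range n).foldl (fun r k => r.set R ((r.getD R []).set (c0 + k) (v k))) res

theorem innerF_length (n c0 R : Nat) (v : Nat → Int) (res : List (List Int)) :
    (innerF n c0 R v res).length = res.length := by
  induction n with
  | zero => rfl
  | succ n ih =>
      simp only [innerF, List.range_succ, List.foldl_append, List.foldl_cons,
        List.foldl_nil] at *
      rw [List.length_set, ih]

theorem innerF_eq (n c0 R : Nat) (v : Nat → Int) (res : List (List Int))
    (hR : R < res.length) :
    innerF n c0 R v res = res.set R (rowW n c0 v (res.getD R [])) := by
  induction n with
  | zero =>
      simp only [innerF, rowW, List.range_zero, List.foldl_nil]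
      rw [List.getD_eq_getElem _ _ hR, List.set_getElem_self]
  | succ n ih =>
      simp only [innerF, rowW, List.range_succ, List.foldl_append, List.foldl_cons,
        List.foldl_nil] at *
      rw [ih]
      have hgd : ∀ W : List Int, (res.set R W).getD R [] = W := by
        intro W
        rw [List.getD_eq_getElem?_getD, List.getElem?_set_self hR, Option.getD_some]
      rw [hgd, List.set_set]

-- one (ty, tx) block: the y-loop writes rows TY*h0 … TY*h0+n-1, each once
theorem block_length (w0 c0 h0 TY : Nat) (v2 : Nat → Nat → Int) (n : Nat) (res : List (List Int)) :
    ((List.range n).foldl (fun r y => innerF w0 c0 (TY * h0 + y) (v2 y) r) res).length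
      = res.length := by
  induction n with
  | zero => rfl
  | succ n ih =>
      simp only [List.range_succ, List.foldl_append, List.foldl_cons, List.foldl_nil]
      rw [innerF_length, ih]

theorem block_getD (w0 c0 h0 TY : Nat) (v2 : Nat → Nat → Int) :
    ∀ (n : Nat) (res : List (List Int)), TY * h0 + n ≤ res.length → ∀ i : Nat,
    (((List.range n).foldl (fun r y => innerF w0 c0 (TY * h0 + y) (v2 y) r) res).getD i []) =
      if TY * h0 ≤ i ∧ i < TY * h0 + n then rowW w0 c0 (v2 (i - TY * h0)) (res.getD i [])
      else res.getD i [] := by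
  intro n
  induction n with
  | zero => intro res _ i; simp
  | succ n ih =>
      intro res hn i
      have hlen := block_length w0 c0 h0 TY v2 n res
      simp only [List.range_succ, List.foldl_append, List.foldl_cons, List.foldl_nil]
      rw [innerF_eq _ _ _ _ _ (by omega)]
      have hprevR := ih res (by omega) (TY * h0 + n)
      rw [if_neg (by omega)] at hprevR
      by_cases hi : i = TY * h0 + n
      · subst hi
        rw [List.getD_eq_getElem?_getD, List.getElem?_set_self (by omega),
            Option.getD_some, hprevR, if_pos (by omega),
            show TY * h0 + n - TY * h0 = n from by omega]
      · rw [List.getD_eq_getElem?_getD, List.getElem?_set_ne (by omega),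
            ← List.getD_eq_getElem?_getD, ih res (by omega) i]
        by_cases h1 : TY * h0 ≤ i ∧ i < TY * h0 + n
        · rw [if_pos h1, if_pos (by omega)]
        · rw [if_neg h1, if_neg (by omega)]

-- the whole grid being tiled, as the four (ty, tx) blocks of A in order
def blockF (w0 c0 h0 TY : Nat) (v2 : Nat → Nat → Int) (res : List (List Int)) : List (List Int) :=
  (List.range h0).foldl (fun r y => innerF w0 c0 (TY * h0 + y) (v2 y) r) res

def v2g (g : List (List Int)) (y k : Nat) : Int := (g.getD y []).getD k 0

theorem blockA (g : List (List Int)) (TY C0 : Nat) (ty tx : Int)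
    (hty : ty = (TY : Int)) (htx : tx * (g.headI.length : Int) = (C0 : Int))
    (res : List (List Int)) :
    (PySem.List.pyRange 0 (g.length : Int) 1).foldl (fun res y =>
      (PySem.List.pyRange 0 (g.headI.length : Int) 1).foldl (fun res x =>
        pySetCell res (ty * (g.length : Int) + y) (tx * (g.headI.length : Int) + x)
          (PySem.List.pyGetD (PySem.List.pyGetD g y []) x 0)) res) res
      = blockF g.headI.length C0 g.length TY (v2g g) res := by
  rw [PySem.List.pyRange_zero_nat g.length, List.foldl_map, blockF]
  congr 1
  funext r y
  rw [PySem.List.pyRange_zero_nat g.headI.length, List.foldl_map, innerF]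
  congr 1
  funext r' x
  have hi : (ty * (g.length : Int) + (y : Int)) = ((TY * g.length + y : Nat) : Int) := by
    rw [hty]; push_cast; ring
  have hj : (tx * (g.headI.length : Int) + (x : Int)) = ((C0 + x : Nat) : Int) := by
    rw [Nat.cast_add, ← htx]
  rw [pySetCell, hi, hj, Int.toNat_natCast, Int.toNat_natCast,
      PySem.List.pyGetD_natCast, PySem.List.pyGetD_natCast]
  rfl

theorem blockF_length (w0 c0 h0 TY : Nat) (v2 : Nat → Nat → Int) (res : List (List Int)) :
    (blockF w0 c0 h0 TY v2 res).length = res.length :=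
  block_length w0 c0 h0 TY v2 h0 res

theorem blockF_getD (w0 c0 h0 TY : Nat) (v2 : Nat → Nat → Int) (res : List (List Int))
    (hlen : TY * h0 + h0 ≤ res.length) (i : Nat) :
    (blockF w0 c0 h0 TY v2 res).getD i [] =
      if TY * h0 ≤ i ∧ i < TY * h0 + h0 then rowW w0 c0 (v2 (i - TY * h0)) (res.getD i [])
      else res.getD i [] :=
  block_getD w0 c0 h0 TY v2 h0 res hlen i

-- one doubled row of the tiling, as A computes it (into a zero row of width 2*w0)
def tRow (w0 : Nat) (v : Nat → Int) : List Int :=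
  rowW w0 w0 v (rowW w0 0 v (List.replicate (w0 * 2) 0))

theorem tRow_length (w0 : Nat) (v : Nat → Int) : (tRow w0 v).length = w0 * 2 := by
  rw [tRow, rowW_length, rowW_length, List.length_replicate]

theorem tRow_getD (w0 j : Nat) (v : Nat → Int) (hj : j < w0 * 2) :
    (tRow w0 v).getD j 0 = if j < w0 then v j else v (j - w0) := by
  rw [tRow, rowW_getD _ _ _ _ _ (by rw [rowW_length, List.length_replicate]; omega),
      rowW_getD _ _ _ _ _ (by rw [List.length_replicate]; omega)]
  by_cases h1 : j < w0
  · rw [if_neg (by omega), if_pos (by omega), if_pos h1]; simp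
  · rw [if_pos (by omega), if_neg h1]

theorem tile_A_eq (g : List (List Int)) (hg : ¬(g = [] ∨ g.headI = [])) :
    tile_2x2 g =
      blockF g.headI.length g.headI.length g.length 1 (v2g g)
        (blockF g.headI.length 0 g.length 1 (v2g g)
          (blockF g.headI.length g.headI.length g.length 0 (v2g g)
            (blockF g.headI.length 0 g.length 0 (v2g g)
              (List.replicate (((g.length : Int) * 2).toNat)
                (List.replicate (((g.headI.length : Int) * 2).toNat) (0 : Int)))))) := by
  rw [tile_2x2, if_neg hg]
  have h2 : PySem.List.pyRange 0 2 1 = [0, 1] := by decide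
  simp only [h2, List.foldl_cons, List.foldl_nil]
  rw [blockA g 0 0 0 0 (by norm_num) (by norm_num),
      blockA g 0 g.headI.length 0 1 (by norm_num) (by norm_num),
      blockA g 1 0 1 0 (by norm_num) (by norm_num),
      blockA g 1 g.headI.length 1 1 (by norm_num) (by norm_num)]

theorem tile_A_getD (g : List (List Int)) (hg : ¬(g = [] ∨ g.headI = [])) (i : Nat)
    (hi : i < g.length * 2) :
    (tile_2x2 g).getD i [] =
      tRow g.headI.length (v2g g (if i < g.length then i else i - g.length)) := by
  set h0 := g.length with hh0
  set w0 := g.headI.length with hw0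
  have hres0 : (((h0 : Int) * 2).toNat) = h0 * 2 := by omega
  have hw2 : (((w0 : Int) * 2).toNat) = w0 * 2 := by omega
  rw [tile_A_eq g hg]
  set res0 : List (List Int) :=
    List.replicate (((h0 : Int) * 2).toNat) (List.replicate (((w0 : Int) * 2).toNat) (0 : Int))
    with hres0def
  have hlen0 : res0.length = h0 * 2 := by rw [hres0def, List.length_replicate, hres0]
  set r1 := blockF w0 0 h0 0 (v2g g) res0 with hr1
  set r2 := blockF w0 w0 h0 0 (v2g g) r1 with hr2
  set r3 := blockF w0 0 h0 1 (v2g g) r2 with hr3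
  have hl1 : r1.length = h0 * 2 := by rw [hr1, blockF_length, hlen0]
  have hl2 : r2.length = h0 * 2 := by rw [hr2, blockF_length, hl1]
  have hl3 : r3.length = h0 * 2 := by rw [hr3, blockF_length, hl2]
  have hg1 := blockF_getD w0 0 h0 0 (v2g g) res0 (by omega) i
  have hg2 := blockF_getD w0 w0 h0 0 (v2g g) r1 (by omega) i
  have hg3 := blockF_getD w0 0 h0 1 (v2g g) r2 (by omega) i
  have hg4 := blockF_getD w0 w0 h0 1 (v2g g) r3 (by omega) i
  have hrow0 : res0.getD i [] = List.replicate (w0 * 2) 0 := by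
    rw [hres0def, List.getD_eq_getElem _ _ (by rw [List.length_replicate]; omega),
        List.getElem_replicate, hw2]
  by_cases hcase : i < h0
  · rw [if_pos hcase]
    rw [hg4, if_neg (by omega), hg3, if_neg (by omega), hg2, if_pos (by omega),
        hg1, if_pos (by omega), hrow0]
    simp only [Nat.zero_mul, Nat.sub_zero, tRow]
  · rw [if_neg hcase]
    rw [hg4, if_pos (by omega), hg3, if_pos (by omega), hg2, if_neg (by omega),
        hg1, if_neg (by omega), hrow0]
    simp only [Nat.one_mul, tRow]

theorem tile_A_length (g : List (List Int)) (hg : ¬(g = [] ∨ g.headI = [])) :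
    (tile_2x2 g).length = g.length * 2 := by
  rw [tile_A_eq g hg, blockF_length, blockF_length, blockF_length, blockF_length,
      List.length_replicate]
  omega

theorem tile_B_eq (g : List (List Int)) (hg : ¬(g = [] ∨ g.headI = [])) :
    tile_2x2_alt g =
      g.map (fun row => row.take g.headI.length ++ row.take g.headI.length) ++
        g.map (fun row => row.take g.headI.length ++ row.take g.headI.length) := by
  rw [tile_2x2_alt, if_neg hg]
  simp only [PySem.List.slice_to_natCast, PySem.List.slice_none_none, List.map_map]
  rfl

-- ===== VERDICT (by name: the statement is the Claim_ definition above) =====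
theorem tile_2x2_spec : Claim_equal_tile_2x2 := by
  intro g _ hpre
  unfold Spec_tile_2x2
  by_cases hg : g = [] ∨ g.headI = []
  · rw [tile_2x2, if_pos hg, tile_2x2_alt, if_pos hg]
  · rw [tile_B_eq g hg]
    set h0 := g.length with hh0def
    set w0 := g.headI.length with hw0def
    set D := g.map (fun row => row.take w0 ++ row.take w0) with hD
    have hDlen : D.length = h0 := by rw [hD, List.length_map]
    have hDgetD : ∀ k, k < h0 → D.getD k [] = (g.getD k []).take w0 ++ (g.getD k []).take w0 := by
      intro k hk
      rw [hD, List.getD_eq_getElem _ _ (by rw [List.length_map]; exact hk), List.getElem_map,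
          ← List.getD_eq_getElem g [] hk]
    apply List.ext_getElem
    · rw [tile_A_length g hg, List.length_append, hDlen]; omega
    intro i hi1 hi2
    have hi' : i < h0 * 2 := by rw [tile_A_length g hg] at hi1; exact hi1
    rw [← List.getD_eq_getElem _ [] hi1, ← List.getD_eq_getElem _ [] hi2,
        tile_A_getD g hg i hi']
    set i' := if i < h0 then i else i - h0 with hi'def
    have hi'lt : i' < h0 := by rw [hi'def]; split <;> omega
    have hBrow : (D ++ D).getD i [] = (g.getD i' []).take w0 ++ (g.getD i' []).take w0 := by
      by_cases hc : i < h0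
      · rw [List.getD_append _ _ _ _ (by omega), hDgetD i (by omega), hi'def, if_pos hc]
      · rw [List.getD_append_right _ _ _ _ (by omega), hDgetD (i - D.length) (by omega),
            hi'def, if_neg hc, hDlen]
    rw [hBrow]
    have hmem : g.getD i' [] ∈ g := by
      rw [List.getD_eq_getElem g [] hi'lt]; exact List.getElem_mem hi'lt
    have hwrow : w0 ≤ (g.getD i' []).length := hpre _ hmem
    have htake : ((g.getD i' []).take w0).length = w0 := by rw [List.length_take]; omega
    have htakeD : ∀ k, k < w0 → ((g.getD i' []).take w0).getD k 0 = (g.getD i' []).getD k 0 := by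
      intro k hk
      rw [List.getD_eq_getElem _ _ (by omega), List.getElem_take,
          ← List.getD_eq_getElem _ 0 (by omega)]
    apply List.ext_getElem
    · rw [tRow_length, List.length_append, htake]; omega
    intro j hj1 hj2
    have hj : j < w0 * 2 := by rw [tRow_length] at hj1; exact hj1
    rw [← List.getD_eq_getElem _ 0 hj1, ← List.getD_eq_getElem _ 0 hj2, tRow_getD w0 j _ hj]
    by_cases hjc : j < w0
    · rw [if_pos hjc, List.getD_append _ _ _ _ (by omega), htakeD j hjc]
      rfl
    · rw [if_neg hjc, List.getD_append_right _ _ _ _ (by omega), htake, htakeD (j - w0) (by omega)]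
      rfl
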